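-- pv_equiv track=rewrite | github.com/BRIANPEPINOS/INTELIGENCIA-ARTIFICIAL | Proyecto IA/main.py | _orden_insercion_balanceada
-- ===== SOURCE A (Python) =====
-- def _orden_insercion_balanceada(tuplas_ordenadas: list[tuple[int, str, str]]):
--
--    # Dado un arreglo ordenado por (suma_ascii, palabra_norm),
--     #devuelve índices en orden "medianas" para insertar y aproximar un BST balanceado.
--     #Idea: insertar primero el medio, luego los medios de cada subarreglo, etc.
--
--     indices = []
--
--     def rec(lo: int, hi: int):
--         if lo > hi:
--             return
--         mid = (lo + hi) // 2
--         indices.append(mid)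
--         rec(lo, mid - 1)
--         rec(mid + 1, hi)
--
--     rec(0, len(tuplas_ordenadas) - 1)
--     return [tuplas_ordenadas[i] for i in indices]
-- ===== SOURCE B (Python) =====
-- def _orden_insercion_balanceada(tuplas_ordenadas: list[tuple[int, str, str]]):
--     # Structural recursion on the list itself: emit the middle element, then
--     # recurse on the left and right slices directly (no index list, no closure).
--     def build(seg):
--         if not seg:
--             return []
--         mid = (len(seg) - 1) // 2
--         return [seg[mid]] + build(seg[:mid]) + build(seg[mid + 1:])
--     return build(tuplas_ordenadas)
-- ===== Notes on version B (the rewrite author's own statement) =====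
-- stated objective: alternative
-- what changed: Replaces the index-generating nested recursion plus final indexing comprehension by a structural recursion on the list itself: emit the middle element of the current slice and recurse on the two sub-slices, returning elements directly with no index list and no closure.
import Mathlib
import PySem

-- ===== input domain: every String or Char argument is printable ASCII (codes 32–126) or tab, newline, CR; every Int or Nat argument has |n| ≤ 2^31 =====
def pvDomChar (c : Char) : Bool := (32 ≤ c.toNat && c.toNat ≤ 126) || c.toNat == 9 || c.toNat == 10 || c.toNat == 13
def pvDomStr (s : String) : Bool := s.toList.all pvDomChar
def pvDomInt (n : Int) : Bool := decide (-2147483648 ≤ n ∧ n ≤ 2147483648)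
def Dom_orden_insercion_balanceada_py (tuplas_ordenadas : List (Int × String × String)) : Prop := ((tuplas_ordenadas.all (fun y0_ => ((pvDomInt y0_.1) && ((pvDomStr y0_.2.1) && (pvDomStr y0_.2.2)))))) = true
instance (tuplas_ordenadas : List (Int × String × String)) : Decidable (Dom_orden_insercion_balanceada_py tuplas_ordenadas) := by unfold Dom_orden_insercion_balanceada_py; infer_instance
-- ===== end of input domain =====

-- B replaces A's index-generating recursion + indexing comprehension by a structural
-- recursion on the list slices themselves (alternative decomposition, similar cost).

-- ===== PORT A =====
-- A's inner recursive helper rec(lo, hi), returning the indices it appends, in order.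
-- The Nat fuel is only a totality guard: it is never exhausted on the call below
-- (the range shrinks by at least one per level). 'mid' is inlined.
def pvRecIdx : Nat → Int → Int → List Int
  | 0, _, _ => []
  | fuel + 1, lo, hi =>
    if lo > hi then []
    else
      PySem.Int.floordiv (lo + hi) 2 ::
        (pvRecIdx fuel lo (PySem.Int.floordiv (lo + hi) 2 - 1) ++
          pvRecIdx fuel (PySem.Int.floordiv (lo + hi) 2 + 1) hi)

-- final comprehension [tuplas[i] for i in indices]; every index produced is in range,
-- so pyGet? is some and the getD default is never used (exact on all inputs).
def orden_insercion_balanceada_py (tuplas_ordenadas : List (Int × String × String)) : List (Int × String × String) :=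
  (pvRecIdx tuplas_ordenadas.length 0 ((tuplas_ordenadas.length : Int) - 1)).map
    (fun i => (PySem.List.pyGet? tuplas_ordenadas i).getD (0, "", ""))

-- ===== PORT B =====
-- B's helper build(seg): empty → []; else [seg[mid]] + build(seg[:mid]) + build(seg[mid+1:]).
-- Fuel is only a totality guard (each slice is strictly shorter, so seg.length suffices).
-- mid = (len(seg)-1)//2 is in range, so pyGet? is some and the getD default is never used.
def pvBuild : Nat → List (Int × String × String) → List (Int × String × String)
  | 0, _ => []
  | fuel + 1, seg =>
    if seg = [] then []
    else
      ((PySem.List.pyGet? seg (PySem.Int.floordiv ((seg.length : Int) - 1) 2)).getD (0, "", "")) ::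
        (pvBuild fuel (PySem.List.slice seg none (some (PySem.Int.floordiv ((seg.length : Int) - 1) 2))) ++
          pvBuild fuel (PySem.List.slice seg (some (PySem.Int.floordiv ((seg.length : Int) - 1) 2 + 1)) none))

def orden_insercion_balanceada_py_alt (tuplas_ordenadas : List (Int × String × String)) : List (Int × String × String) :=
  pvBuild tuplas_ordenadas.length tuplas_ordenadas

-- ===== PRECONDITION & SPEC =====
def Spec_orden_insercion_balanceada_py (tuplas_ordenadas : List (Int × String × String)) (out : List (Int × String × String)) : Prop := out = orden_insercion_balanceada_py_alt tuplas_ordenadas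
instance (tuplas_ordenadas : List (Int × String × String)) (out : List (Int × String × String)) : Decidable (Spec_orden_insercion_balanceada_py tuplas_ordenadas out) := by unfold Spec_orden_insercion_balanceada_py; infer_instance

-- ===== CLAIM (what is proved, stated in full; the proofs are below) =====
def Claim_equal_orden_insercion_balanceada_py : Prop := ∀ (tuplas_ordenadas : List (Int × String × String)), Dom_orden_insercion_balanceada_py tuplas_ordenadas → Spec_orden_insercion_balanceada_py tuplas_ordenadas (orden_insercion_balanceada_py tuplas_ordenadas)

-- ===== LEMMAS AND PROOFS =====
-- Canonical index sequence of a range: A's recursion with exactly enough fuel.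
def pvR (lo hi : Int) : List Int := pvRecIdx (hi - lo + 1).toNat lo hi

theorem pvRecIdx_stop {n : Nat} {lo hi : Int} (h : hi < lo) : pvRecIdx n lo hi = [] := by
  cases n <;> simp [pvRecIdx, h]

-- fuel irrelevance: any fuel at least the range length computes the same list
theorem pvRecIdx_congr : ∀ (n m : Nat) (lo hi : Int), (hi - lo + 1).toNat ≤ n →
    (hi - lo + 1).toNat ≤ m → pvRecIdx n lo hi = pvRecIdx m lo hi := by
  intro n
  induction n with
  | zero =>
    intro m lo hi h1 _
    have hlt : hi < lo := by omega
    rw [pvRecIdx_stop hlt, pvRecIdx_stop hlt]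
  | succ n ih =>
    intro m lo hi h1 h2
    by_cases hc : lo > hi
    · rw [pvRecIdx_stop hc, pvRecIdx_stop hc]
    · have hb := PySem.Int.floordiv_two_mid_bounds (le_of_not_gt hc)
      cases m with
      | zero => omega
      | succ m =>
        simp only [pvRecIdx, if_neg hc]
        rw [ih m lo (PySem.Int.floordiv (lo + hi) 2 - 1) (by omega) (by omega),
            ih m (PySem.Int.floordiv (lo + hi) 2 + 1) hi (by omega) (by omega)]

theorem pvR_stop {lo hi : Int} (h : hi < lo) : pvR lo hi = [] := pvRecIdx_stop h

theorem pvR_step {lo hi : Int} (h : ¬ lo > hi) :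
    pvR lo hi =
      PySem.Int.floordiv (lo + hi) 2 ::
        (pvR lo (PySem.Int.floordiv (lo + hi) 2 - 1) ++ pvR (PySem.Int.floordiv (lo + hi) 2 + 1) hi) := by
  have hb := PySem.Int.floordiv_two_mid_bounds (le_of_not_gt h)
  obtain ⟨k, hk⟩ : ∃ k, (hi - lo + 1).toNat = k + 1 := ⟨(hi - lo + 1).toNat - 1, by omega⟩
  unfold pvR
  rw [hk]
  simp only [pvRecIdx, if_neg h]
  rw [pvRecIdx_congr k _ lo (PySem.Int.floordiv (lo + hi) 2 - 1) (by omega) (le_refl _),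
      pvRecIdx_congr k _ (PySem.Int.floordiv (lo + hi) 2 + 1) hi (by omega) (le_refl _)]

-- every emitted index lies in the range
theorem pvR_mem : ∀ (k : Nat) (lo hi i : Int), (hi - lo + 1).toNat ≤ k →
    i ∈ pvR lo hi → lo ≤ i ∧ i ≤ hi := by
  intro k
  induction k with
  | zero =>
    intro lo hi i h hm
    rw [pvR_stop (by omega)] at hm
    simp at hm
  | succ k ih =>
    intro lo hi i h hm
    by_cases hc : lo > hi
    · rw [pvR_stop hc] at hm; simp at hm
    · have hb := PySem.Int.floordiv_two_mid_bounds (le_of_not_gt hc)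
      rw [pvR_step hc] at hm
      simp only [List.mem_cons, List.mem_append] at hm
      rcases hm with h1 | h2 | h3
      · omega
      · have := ih lo _ i (by omega) h2; omega
      · have := ih _ hi i (by omega) h3; omega

-- shifting the range shifts every index
theorem pvR_shift : ∀ (k : Nat) (lo hi c : Int), (hi - lo + 1).toNat ≤ k →
    pvR (lo + c) (hi + c) = (pvR lo hi).map (· + c) := by
  intro k
  induction k with
  | zero =>
    intro lo hi c h
    rw [pvR_stop (by omega), pvR_stop (by omega)]
    simp
  | succ k ih =>
    intro lo hi c h
    by_cases hc : lo > hi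
    · rw [pvR_stop hc, pvR_stop (by omega)]; simp
    · have hb := PySem.Int.floordiv_two_mid_bounds (le_of_not_gt hc)
      have hmid : PySem.Int.floordiv (lo + c + (hi + c)) 2 = PySem.Int.floordiv (lo + hi) 2 + c := by
        rw [PySem.Int.floordiv_eq_ediv_of_pos (by omega), PySem.Int.floordiv_eq_ediv_of_pos (by omega)]
        omega
      rw [pvR_step hc, pvR_step (show ¬ lo + c > hi + c by omega)]
      simp only [hmid, List.map_cons, List.map_append]
      rw [show PySem.Int.floordiv (lo + hi) 2 + c - 1 = PySem.Int.floordiv (lo + hi) 2 - 1 + c by ring,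
          show PySem.Int.floordiv (lo + hi) 2 + c + 1 = PySem.Int.floordiv (lo + hi) 2 + 1 + c by ring,
          ih lo _ c (by omega), ih _ hi c (by omega)]

-- main invariant: B's build equals A's index sequence mapped through indexing
theorem pvBuild_eq : ∀ (fuel : Nat) (xs : List (Int × String × String)), xs.length ≤ fuel →
    pvBuild fuel xs =
      (pvR 0 ((xs.length : Int) - 1)).map (fun i => (PySem.List.pyGet? xs i).getD (0, "", "")) := by
  intro fuel
  induction fuel with
  | zero =>
    intro xs h
    have : xs = [] := by cases xs <;> simp_all
    subst this
    rw [pvR_stop (by norm_num)]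
    simp [pvBuild]
  | succ fuel ih =>
    intro xs h
    by_cases hnil : xs = []
    · subst hnil; rw [pvR_stop (by norm_num)]; simp [pvBuild]
    · have hn : 1 ≤ xs.length := by cases xs <;> simp_all
      set n : Nat := xs.length with hndef
      have hm : PySem.Int.floordiv ((n : Int) - 1) 2 = ((n : Int) - 1) / 2 :=
        PySem.Int.floordiv_eq_ediv_of_pos (by omega)
      set m : Int := PySem.Int.floordiv ((n : Int) - 1) 2 with hmdef
      have hmb : 0 ≤ m ∧ m ≤ (n : Int) - 1 := by omega
      set M : Nat := m.toNat with hMdef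
      have hmM : m = (M : Int) := by omega
      have hMn : M < n := by omega
      -- unfold one step of B
      rw [show pvBuild (fuel + 1) xs =
            ((PySem.List.pyGet? xs m).getD (0, "", "")) ::
              (pvBuild fuel (PySem.List.slice xs none (some m)) ++
                pvBuild fuel (PySem.List.slice xs (some (m + 1)) none)) from by
            simp only [pvBuild, if_neg hnil]; rfl]
      -- unfold one step of A's canonical sequence
      have hstep := pvR_step (lo := 0) (hi := (n : Int) - 1) (by omega)
      rw [show (0 : Int) + ((n : Int) - 1) = (n : Int) - 1 by ring] at hstep
      rw [hstep, ← hmdef]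
      simp only [List.map_cons, List.map_append]
      refine congrArg₂ List.cons rfl ?_
      refine congrArg₂ (· ++ ·) ?_ ?_
      · -- left slice
        rw [PySem.List.slice_to xs (by omega), ← hMdef]
        rw [ih (xs.take M) (by simp [List.length_take]; omega)]
        have hlen : ((xs.take M).length : Int) - 1 = m - 1 := by
          simp [List.length_take]; omega
        rw [hlen]
        refine List.map_congr_left ?_
        intro i hi
        have hib := pvR_mem (m - 1 - 0 + 1).toNat 0 (m - 1) i (le_refl _) hi
        have hi' : i = ((i.toNat : Nat) : Int) := by omega
        rw [hi', PySem.List.pyGet?_natCast, PySem.List.pyGet?_natCast]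
        rw [List.getElem?_take]
        rw [if_pos (by omega)]
      · -- right slice
        rw [PySem.List.slice_from xs (by omega)]
        have ht : (m + 1).toNat = M + 1 := by omega
        rw [ht, ih (xs.drop (M + 1)) (by simp only [List.length_drop]; omega)]
        set K : Nat := n - (M + 1) with hKdef
        have hlen : ((xs.drop (M + 1)).length : Int) - 1 = (K : Int) - 1 := by
          simp only [List.length_drop]; omega
        rw [hlen]
        have hsh : pvR (m + 1) ((n : Int) - 1) = (pvR 0 ((K : Int) - 1)).map (· + (m + 1)) := by
          have := pvR_shift ((K : Int) - 1 - 0 + 1).toNat 0 ((K : Int) - 1) (m + 1) (le_refl _)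
          rw [show (0 : Int) + (m + 1) = m + 1 by ring,
              show (K : Int) - 1 + (m + 1) = (n : Int) - 1 by omega] at this
          exact this
        rw [hsh, List.map_map]
        refine List.map_congr_left ?_
        intro i hi
        have hib := pvR_mem ((K : Int) - 1 - 0 + 1).toNat 0 ((K : Int) - 1) i (le_refl _) hi
        have hi' : i = ((i.toNat : Nat) : Int) := by omega
        simp only [Function.comp_apply]
        rw [hi', PySem.List.pyGet?_natCast,
            show ((i.toNat : Nat) : Int) + (m + 1) = (((i.toNat + (M + 1) : Nat)) : Int) by omega,
            PySem.List.pyGet?_natCast]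
        rw [List.getElem?_drop, Nat.add_comm (M + 1) i.toNat]

-- ===== VERDICT (by name: the statement is the Claim_ definition above) =====
theorem orden_insercion_balanceada_py_spec : Claim_equal_orden_insercion_balanceada_py := by
  intro xs _
  unfold Spec_orden_insercion_balanceada_py orden_insercion_balanceada_py orden_insercion_balanceada_py_alt
  rw [pvBuild_eq xs.length xs (le_refl _),
      pvRecIdx_congr xs.length (((xs.length : Int) - 1) - 0 + 1).toNat 0 ((xs.length : Int) - 1) (by omega) (le_refl _)]
  rfl
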